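-- pv_equiv track=rewrite | github.com/gonuke/cyclus_gui | cyclus_gui/gui/proto_window.py | reasonable_linebreak
-- ===== SOURCE A (Python) =====
-- def reasonable_linebreak(string, lim=50):
--     nlines = len(string) // lim
--
--     space_indices = []
--     for i in range(nlines):
--         n = (i+1)*lim
--         space_indices.append(string[n:].find(' ') + n)
--
--     new_str = ''
--     for indx, val in enumerate(string):
--         if indx not in space_indices:
--             new_str += val
--         else:
--             new_str += '\n'
--
--     return new_str
-- ===== SOURCE B (Python) =====
-- def reasonable_linebreak(string, lim=50):
--     nlines = len(string) // lim
--
--     breaks = set()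
--     for i in range(nlines):
--         n = (i + 1) * lim
--         breaks.add(string[n:].find(' ') + n)
--
--     parts = []
--     prev = 0
--     for b in sorted(breaks):
--         parts.append(string[prev:b])
--         prev = b + 1
--     parts.append(string[prev:])
--     return '\n'.join(parts)
-- ===== Notes on version B (the rewrite author's own statement) =====
-- stated objective: faster
-- what changed: B collects the break indices into a de-duplicated sorted set and builds the result by slicing the string into segments at those break points and joining with ' ', instead of A's per-character scan with a list-membership test at every character.
import Mathlib
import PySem

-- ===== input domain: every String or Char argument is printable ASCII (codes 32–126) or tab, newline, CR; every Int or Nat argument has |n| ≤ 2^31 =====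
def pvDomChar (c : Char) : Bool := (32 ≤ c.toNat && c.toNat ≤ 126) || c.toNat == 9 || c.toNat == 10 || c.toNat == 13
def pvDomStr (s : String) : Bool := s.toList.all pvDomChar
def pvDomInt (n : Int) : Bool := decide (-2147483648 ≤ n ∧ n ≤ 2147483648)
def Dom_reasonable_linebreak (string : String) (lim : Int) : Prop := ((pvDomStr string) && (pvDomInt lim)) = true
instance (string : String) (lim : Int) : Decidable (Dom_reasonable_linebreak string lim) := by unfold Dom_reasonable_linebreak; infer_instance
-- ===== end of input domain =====

-- B replaces A's per-character membership scan with cutting the string into segments at the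
-- sorted, de-duplicated break indices and joining them with '\n' (objective: alternative).

-- ===== PORT A =====
def reasonable_linebreak (string : String) (lim : Int) : String :=
  let s := string.toList
  let nlines := PySem.Int.floordiv (s.length : Int) lim
  let space_indices : List Int := (PySem.List.pyRange 0 nlines 1).foldl (fun acc i =>
      let n := (i + 1) * lim
      acc ++ [PySem.Chars.find (PySem.List.slice s (some n) none) [' '] + n]) []
  let new_str := (PySem.List.enumerate s 0).foldl (fun acc p =>
      if p.1 ∉ space_indices then acc ++ [p.2] else acc ++ ['\n']) []
  String.ofList new_str

-- ===== PORT B =====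
def reasonable_linebreak_alt (string : String) (lim : Int) : String :=
  let s := string.toList
  let nlines := PySem.Int.floordiv (s.length : Int) lim
  let breaks : PySem.Set Int := (PySem.List.pyRange 0 nlines 1).foldl (fun acc i =>
      let n := (i + 1) * lim
      PySem.Set.add acc (PySem.Chars.find (PySem.List.slice s (some n) none) [' '] + n)) PySem.Set.empty
  let res := (PySem.List.sorted breaks (fun x => x) false).foldl
      (fun (st : List (List Char) × Int) b =>
        (st.1 ++ [PySem.List.slice s (some st.2) (some b)], b + 1)) ([], 0)
  let parts := res.1 ++ [PySem.List.slice s (some res.2) none]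
  String.ofList (PySem.Chars.join ['\n'] parts)

-- ===== PRECONDITION & SPEC =====
-- Pre_ excludes exactly lim = 0, where Python A raises ZeroDivisionError (as does B).
def Pre_reasonable_linebreak (string : String) (lim : Int) : Prop := lim ≠ 0
instance (string : String) (lim : Int) : Decidable (Pre_reasonable_linebreak string lim) := by
  unfold Pre_reasonable_linebreak; infer_instance

def pvWitness_reasonable_linebreak : String × Int := ("a b cd", 2)

def Spec_reasonable_linebreak (string : String) (lim : Int) (out : String) : Prop :=
  out = reasonable_linebreak_alt string lim
instance (string : String) (lim : Int) (out : String) : Decidable (Spec_reasonable_linebreak string lim out) := by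
  unfold Spec_reasonable_linebreak; infer_instance

-- ===== CLAIM (what is proved, stated in full; the proofs are below) =====
def Claim_equal_reasonable_linebreak : Prop := ∀ (string : String) (lim : Int),
  Dom_reasonable_linebreak string lim → Pre_reasonable_linebreak string lim →
  Spec_reasonable_linebreak string lim (reasonable_linebreak string lim)

-- ===== LEMMAS AND PROOFS =====

-- proof-only helpers: the segments B's fold produces, and the final cursor position
def pvSegParts (s : List Char) : Int → List Int → List (List Char)
  | _, [] => []
  | prev, b :: t => PySem.List.slice s (some prev) (some b) :: pvSegParts s (b + 1) t

def pvLastPrev : Int → List Int → Int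
  | prev, [] => prev
  | _, b :: t => pvLastPrev (b + 1) t

-- B's fold, unrolled into pvSegParts / pvLastPrev
theorem pvSegFold_eq (s : List Char) (bs : List Int) (parts : List (List Char)) (prev : Int) :
    bs.foldl (fun (st : List (List Char) × Int) b =>
        (st.1 ++ [PySem.List.slice s (some st.2) (some b)], b + 1)) (parts, prev)
      = (parts ++ pvSegParts s prev bs, pvLastPrev prev bs) := by
  induction bs generalizing parts prev with
  | nil => simp [pvSegParts, pvLastPrev]
  | cons b t ih => simp [pvSegParts, pvLastPrev, ih]

-- main segment lemma: joining the cut segments = pointwise replacement at the break indices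
theorem pvJoin_segParts (s : List Char) (bs : List Int) (prev : Int)
    (hprev : 0 ≤ prev)
    (hbd : ∀ b ∈ bs, prev ≤ b ∧ b < (s.length : Int))
    (hsorted : bs.Pairwise (· < ·)) :
    PySem.Chars.join ['\n'] (pvSegParts s prev bs ++ [PySem.List.slice s (some (pvLastPrev prev bs)) none])
      = (PySem.List.enumerate (s.drop prev.toNat) prev).map
          (fun p => if p.1 ∈ bs then '\n' else p.2) := by
  induction bs generalizing prev with
  | nil =>
      rw [List.map_congr_left (g := fun p => p.2) (by intro a ha; simp)]
      simp [pvSegParts, pvLastPrev, PySem.Chars.join_singleton,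
        PySem.List.slice_from _ hprev, PySem.List.map_snd_enumerate]
  | cons b t ih =>
      have hpb := (hbd b (by simp)).1
      have hblt := (hbd b (by simp)).2
      have hbd' : ∀ x ∈ t, prev ≤ x ∧ x < (s.length : Int) := fun x hx => hbd x (List.mem_cons_of_mem _ hx)
      rw [List.pairwise_cons] at hsorted
      obtain ⟨hbt, hst⟩ := hsorted
      have hb0 : 0 ≤ b := le_trans hprev hpb
      have hbn : b.toNat < s.length := by omega
      -- split the dropped suffix at b
      have hsplit : s.drop prev.toNat
          = (s.drop prev.toNat).take (b.toNat - prev.toNat) ++ (s[b.toNat] :: s.drop (b.toNat + 1)) := by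
        conv_lhs => rw [← List.take_append_drop (b.toNat - prev.toNat) (s.drop prev.toNat)]
        rw [List.drop_drop]
        congr 1
        rw [show prev.toNat + (b.toNat - prev.toNat) = b.toNat by omega]
        exact List.drop_eq_getElem_cons hbn
      have hIH := ih (b + 1) (by omega)
        (fun x hx => ⟨by have := hbt x hx; omega, (hbd' x hx).2⟩) hst
      have hLHS : PySem.Chars.join ['\n'] (pvSegParts s prev (b :: t) ++
            [PySem.List.slice s (some (pvLastPrev prev (b :: t))) none])
          = PySem.List.slice s (some prev) (some b) ++ ['\n'] ++
            PySem.Chars.join ['\n'] (pvSegParts s (b + 1) t ++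
              [PySem.List.slice s (some (pvLastPrev (b + 1) t)) none]) := by
        simp only [pvSegParts, pvLastPrev, List.cons_append]
        cases hl : pvSegParts s (b + 1) t ++ [PySem.List.slice s (some (pvLastPrev (b + 1) t)) none] with
        | nil => simpa using congrArg List.length hl
        | cons y l => rw [PySem.Chars.join_cons_cons]
      rw [hLHS, hIH]
      conv_rhs => rw [hsplit]
      rw [PySem.List.enumerate_append, List.map_append, PySem.List.enumerate_cons, List.map_cons]
      have hlen1 : ((s.drop prev.toNat).take (b.toNat - prev.toNat)).length = b.toNat - prev.toNat := by
        simp; omega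
      rw [hlen1]
      have hstart : prev + ((b.toNat - prev.toNat : Nat) : Int) = b := by omega
      rw [hstart]
      have hchunk1 : (PySem.List.enumerate ((s.drop prev.toNat).take (b.toNat - prev.toNat)) prev).map
            (fun p => if p.1 ∈ b :: t then '\n' else p.2)
          = (s.drop prev.toNat).take (b.toNat - prev.toNat) := by
        rw [List.map_congr_left (g := fun p => p.2), PySem.List.map_snd_enumerate]
        intro p hp
        rw [PySem.List.mem_enumerate_iff] at hp
        obtain ⟨k, hk, rfl⟩ := hp
        have hk' : k < b.toNat - prev.toNat := by simpa [hlen1] using hk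
        have hlt : prev + (k : Int) < b := by omega
        have : prev + (k : Int) ∉ b :: t := by
          intro hmem
          rcases List.mem_cons.mp hmem with h | h
          · omega
          · have := hbt _ h; omega
        simp [this]
      rw [hchunk1]
      have htail : (PySem.List.enumerate (s.drop (b.toNat + 1)) (b + 1)).map
            (fun p => if p.1 ∈ b :: t then '\n' else p.2)
          = (PySem.List.enumerate (s.drop (b.toNat + 1)) (b + 1)).map
            (fun p => if p.1 ∈ t then '\n' else p.2) := by
        apply List.map_congr_left
        intro p hp
        rw [PySem.List.mem_enumerate_iff] at hp
        obtain ⟨k, hk, rfl⟩ := hp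
        have hne : b + 1 + (k : Int) ≠ b := by omega
        simp [List.mem_cons, hne]
      have htn : (b + 1).toNat = b.toNat + 1 := by omega
      rw [htn, htail, PySem.List.slice_toNat s hprev hb0]
      simp

-- every break index A computes lies in [0, len)
theorem pvBreak_bounds (s : List Char) (lim : Int) (hlim0 : lim ≠ 0) (i : Int)
    (hi : i ∈ PySem.List.pyRange 0 (PySem.Int.floordiv (s.length : Int) lim) 1) :
    0 ≤ PySem.Chars.find (PySem.List.slice s (some ((i + 1) * lim)) none) [' '] + (i + 1) * lim ∧
    PySem.Chars.find (PySem.List.slice s (some ((i + 1) * lim)) none) [' '] + (i + 1) * lim < (s.length : Int) := by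
  rw [PySem.List.mem_pyRange_one] at hi
  obtain ⟨hi0, hin⟩ := hi
  have hq := PySem.Int.floordiv_mul_add_mod (s.length : Int) lim
  have hlim : 0 < lim := by
    rcases lt_trichotomy lim 0 with hneg | h0 | h
    · exfalso
      have hr := PySem.Int.mod_neg_bounds (s.length : Int) hneg
      have hq1 : 1 ≤ PySem.Int.floordiv (s.length : Int) lim := by omega
      nlinarith [Int.natCast_nonneg s.length]
    · exact absurd h0 hlim0
    · exact h
  have hr0 := PySem.Int.mod_nonneg (s.length : Int) hlim
  have hn0 : 0 < (i + 1) * lim := by positivity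
  have hnle : (i + 1) * lim ≤ (s.length : Int) := by
    have h1 : (i + 1) * lim ≤ PySem.Int.floordiv (s.length : Int) lim * lim :=
      mul_le_mul_of_nonneg_right (by omega) (le_of_lt hlim)
    omega
  rw [PySem.List.slice_from s (le_of_lt hn0)]
  set F := PySem.Chars.find (s.drop ((i + 1) * lim).toNat) [' '] with hF
  have hF1 : -1 ≤ F := PySem.Chars.neg_one_le_find _ _
  by_cases hpos : 0 ≤ F
  · have hsp := (PySem.Chars.find_spec hpos).1
    have hlen := hsp.length_le
    simp [List.length_drop] at hlen
    omega
  · have hFm1 : F = -1 := by omega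
    rw [hFm1]
    omega

-- ===== VERDICT (by name: the statement is the Claim_ definition above) =====
theorem reasonable_linebreak_spec : Claim_equal_reasonable_linebreak := by
  intro string lim _hdom hpre
  unfold Spec_reasonable_linebreak
  simp only [reasonable_linebreak, reasonable_linebreak_alt]
  set s := string.toList with hs
  set nlines := PySem.Int.floordiv (s.length : Int) lim with hn
  set rng := PySem.List.pyRange 0 nlines 1 with hrng
  set f : Int → Int := fun i =>
    PySem.Chars.find (PySem.List.slice s (some ((i + 1) * lim)) none) [' '] + (i + 1) * lim with hf
  -- A's space_indices is a map over the range
  have hsis : rng.foldl (fun acc i =>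
      acc ++ [PySem.Chars.find (PySem.List.slice s (some ((i + 1) * lim)) none) [' '] + (i + 1) * lim]) []
      = rng.map f := by
    rw [PySem.List.foldl_append_singleton_eq_map f rng []]
    simp
  -- B's breaks is the set of the same list
  have hbk : rng.foldl (fun acc i =>
      PySem.Set.add acc (PySem.Chars.find (PySem.List.slice s (some ((i + 1) * lim)) none) [' '] + (i + 1) * lim))
      PySem.Set.empty = PySem.Set.ofList (rng.map f) := by
    rw [PySem.Set.ofList_eq_foldl, List.foldl_map]
    rfl
  rw [hsis, hbk]
  set sis := rng.map f with hsisv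
  set L := PySem.List.sorted (PySem.Set.ofList sis) (fun x => x) false with hL
  have hmem : ∀ x : Int, x ∈ L ↔ x ∈ sis := by
    intro x
    rw [List.Perm.mem_iff (PySem.List.sorted_perm _ _ _), PySem.Set.mem_ofList]
  have hpw : L.Pairwise (· < ·) := by
    have h1 : L.Pairwise (· ≤ ·) := PySem.List.sorted_pairwise _ _
    have h2 : L.Nodup := (List.Perm.nodup_iff (PySem.List.sorted_perm _ _ _)).mpr
      (PySem.Set.nodup_ofList _)
    exact (h1.and h2).imp (fun h => lt_of_le_of_ne h.1 h.2)
  have hbd : ∀ b ∈ L, (0 : Int) ≤ b ∧ b < (s.length : Int) := by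
    intro b hb
    rw [hmem, hsisv, List.mem_map] at hb
    obtain ⟨i, hi, rfl⟩ := hb
    exact pvBreak_bounds s lim hpre i hi
  rw [pvSegFold_eq s L [] 0, List.nil_append]
  rw [pvJoin_segParts s L 0 le_rfl hbd hpw]
  have hA : (PySem.List.enumerate s 0).foldl (fun acc p =>
      if p.1 ∉ sis then acc ++ [p.2] else acc ++ ['\n']) []
      = (PySem.List.enumerate s 0).map (fun p => if p.1 ∈ L then '\n' else p.2) := by
    rw [PySem.List.foldl_congr_mem _ _ (fun acc p => acc ++ [if p.1 ∈ L then '\n' else p.2]) _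
      (by intro acc p _; by_cases h : p.1 ∈ sis <;> simp [h, hmem])]
    rw [PySem.List.foldl_append_singleton_eq_map]
    simp
  rw [hA]
  simp
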